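-- pv_equiv track=rewrite | github.com/ayukyo/alltoolkit | Python/rotation_cipher_utils/mod.py | rot5
-- ===== SOURCE A (Python) =====
-- def rot5(text: str) -> str:
--     """
--     Apply ROT5 cipher (rotate digits by 5 positions).
--
--     ROT5 is its own inverse for digits 0-9.
--
--     Args:
--         text: Input text
--
--     Returns:
--         Text with digits rotated by 5
--
--     Examples:
--         >>> rot5('0123456789')
--         '5678901234'
--         >>> rot5('Hello 123')
--         'Hello 678'
--     """
--     result = []
--     for char in text:
--         if char.isdigit():
--             result.append(str((int(char) + 5) % 10))
--         else:
--             result.append(char)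
--     return ''.join(result)
-- ===== SOURCE B (Python) =====
-- def rot5(text: str) -> str:
--     # Run-based scan: copy maximal non-digit segments wholesale as slices,
--     # and rotate each digit by a +/-5 code shift (ROT5 swaps '0'-'4' with '5'-'9').
--     pieces = []
--     j, n = 0, len(text)
--     while j < n:
--         i = j
--         while j < n and not '0' <= text[j] <= '9':
--             j += 1
--         pieces.append(text[i:j])
--         while j < n and '0' <= text[j] <= '9':
--             c = text[j]
--             pieces.append(chr(ord(c) + 5) if c <= '4' else chr(ord(c) - 5))
--             j += 1
--     return ''.join(pieces)
-- ===== Notes on version B (the rewrite author's own statement) =====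
-- stated objective: alternative
-- what changed: Replaces A's per-character isdigit/int/str loop by a run-based scan that copies maximal non-digit segments wholesale as slices and rotates each digit with a +/-5 character-code shift (no decimal conversion, no modulo).
import Mathlib
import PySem

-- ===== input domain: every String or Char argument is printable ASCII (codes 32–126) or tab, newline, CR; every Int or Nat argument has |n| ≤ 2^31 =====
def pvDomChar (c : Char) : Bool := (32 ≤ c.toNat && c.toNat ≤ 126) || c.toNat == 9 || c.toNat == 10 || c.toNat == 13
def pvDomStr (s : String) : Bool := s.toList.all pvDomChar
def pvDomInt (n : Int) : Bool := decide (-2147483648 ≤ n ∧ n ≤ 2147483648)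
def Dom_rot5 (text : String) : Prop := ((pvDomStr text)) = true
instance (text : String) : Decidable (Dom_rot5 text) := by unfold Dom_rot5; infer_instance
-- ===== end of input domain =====

-- B replaces A's per-character isdigit/int/str loop by a run-based scan: maximal non-digit
-- segments are copied wholesale and each digit is rotated by a ±5 character-code shift
-- (ROT5 swaps the half-ranges '0'-'4' and '5'-'9'); alternative decomposition.

-- ===== PORT A =====
-- loop: result.append(str((int(char)+5)%10)) if char.isdigit() else result.append(char); ''.join(result)
def rot5 (text : String) : String :=
  let result : List (List Char) :=
    text.toList.foldl (fun r c =>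
      r ++ [ if PySem.Chars.isdigit c
             then PySem.Int.toChars (PySem.Int.mod ((PySem.Int.ofChars? [c]).getD 0 + 5) 10)
             else [c] ]) []
  String.mk (PySem.Chars.join [] result)

-- ===== PORT B =====
-- '0' <= c <= '9'
def rot5IsDig (c : Char) : Bool := decide ('0' ≤ c) && decide (c ≤ '9')

-- chr(ord(c)+5) if c <= '4' else chr(ord(c)-5)
def rot5Shift (c : Char) : Char :=
  if c ≤ '4' then Char.ofNat (c.toNat + 5) else Char.ofNat (c.toNat - 5)

theorem rot5_go_dec (c : Char) (cs : List Char) :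
    (((c :: cs).dropWhile (fun x => !rot5IsDig x)).dropWhile rot5IsDig).length < (c :: cs).length := by
  by_cases h : rot5IsDig c = true
  · have h1 := List.length_dropWhile_le rot5IsDig cs
    simp [h]
    omega
  · have h1 := List.length_dropWhile_le (fun x => !rot5IsDig x) cs
    have h2 := List.length_dropWhile_le rot5IsDig (cs.dropWhile (fun x => !rot5IsDig x))
    simp [h]
    omega

-- the outer while loop of Source B: emit one non-digit run, then the rotated digits of one digit run, repeat
def rot5_go (l : List Char) : List (List Char) :=
  match l with
  | [] => []
  | c :: cs =>
    let nd := (c :: cs).takeWhile (fun x => !rot5IsDig x)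
    let r1 := (c :: cs).dropWhile (fun x => !rot5IsDig x)
    let ds := r1.takeWhile rot5IsDig
    let r2 := r1.dropWhile rot5IsDig
    nd :: (ds.map (fun d => [rot5Shift d]) ++ rot5_go r2)
termination_by l.length
decreasing_by exact rot5_go_dec c cs

def rot5_alt (text : String) : String :=
  String.mk (PySem.Chars.join [] (rot5_go text.toList))

-- ===== PRECONDITION & SPEC =====
def Spec_rot5 (text : String) (out : String) : Prop := out = rot5_alt text
instance (text : String) (out : String) : Decidable (Spec_rot5 text out) := by unfold Spec_rot5; infer_instance

-- ===== CLAIM (what is proved, stated in full; the proofs are below) =====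
def Claim_equal_rot5 : Prop := ∀ (text : String), Dom_rot5 text → Spec_rot5 text (rot5 text)

-- ===== LEMMAS AND PROOFS =====

-- the per-character value both programs realize
def rot5Char (c : Char) : Char := if rot5IsDig c then rot5Shift c else c

theorem char_le_iff (a b : Char) : a ≤ b ↔ a.toNat ≤ b.toNat := by
  rw [Char.le_def, UInt32.le_iff_toNat_le]; rfl

theorem char_eq_of_toNat {c d : Char} (h : c.toNat = d.toNat) : c = d :=
  Char.ext (UInt32.toNat_inj.mp h)

-- each iteration of A's loop appends exactly [rot5Char c]
theorem rot5_step (c : Char) :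
    (if PySem.Chars.isdigit c
     then PySem.Int.toChars (PySem.Int.mod ((PySem.Int.ofChars? [c]).getD 0 + 5) 10)
     else [c]) = [rot5Char c] := by
  by_cases h : PySem.Chars.isdigit c = true
  · have h' := h
    simp only [PySem.Chars.isdigit, Bool.and_eq_true, decide_eq_true_eq] at h'
    obtain ⟨h1, h2⟩ := h'
    have hlo : 48 ≤ c.toNat := (char_le_iff '0' c).mp h1
    have hhi : c.toNat ≤ 57 := (char_le_iff c '9').mp h2
    have hn : c.toNat = 48 ∨ c.toNat = 49 ∨ c.toNat = 50 ∨ c.toNat = 51 ∨ c.toNat = 52 ∨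
        c.toNat = 53 ∨ c.toNat = 54 ∨ c.toNat = 55 ∨ c.toNat = 56 ∨ c.toNat = 57 := by omega
    rcases hn with hn|hn|hn|hn|hn|hn|hn|hn|hn|hn
    · rw [char_eq_of_toNat (c := c) (d := '0') (by rw [hn]; decide)]; decide
    · rw [char_eq_of_toNat (c := c) (d := '1') (by rw [hn]; decide)]; decide
    · rw [char_eq_of_toNat (c := c) (d := '2') (by rw [hn]; decide)]; decide
    · rw [char_eq_of_toNat (c := c) (d := '3') (by rw [hn]; decide)]; decide
    · rw [char_eq_of_toNat (c := c) (d := '4') (by rw [hn]; decide)]; decide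
    · rw [char_eq_of_toNat (c := c) (d := '5') (by rw [hn]; decide)]; decide
    · rw [char_eq_of_toNat (c := c) (d := '6') (by rw [hn]; decide)]; decide
    · rw [char_eq_of_toNat (c := c) (d := '7') (by rw [hn]; decide)]; decide
    · rw [char_eq_of_toNat (c := c) (d := '8') (by rw [hn]; decide)]; decide
    · rw [char_eq_of_toNat (c := c) (d := '9') (by rw [hn]; decide)]; decide
  · have hd : rot5IsDig c = false := by
      rw [Bool.eq_false_iff]
      intro hc
      exact h hc
    simp [h, rot5Char, hd]

-- A's append-one-piece loop produces the list of per-character pieces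
theorem foldl_singletons (f : Char → List Char) (l : List Char) (acc : List (List Char)) :
    l.foldl (fun r c => r ++ [f c]) acc = acc ++ l.map f := by
  induction l generalizing acc with
  | nil => simp
  | cons c cs ih => simp [List.foldl_cons, ih, List.append_assoc]

-- ''.join with empty separator is flatten
theorem joinNilFlatten : ∀ (l : List (List Char)), PySem.Chars.join [] l = l.flatten
  | [] => by simp [PySem.Chars.join_nil]
  | [x] => by simp [PySem.Chars.join_singleton]
  | x :: y :: r => by
    rw [PySem.Chars.join_cons_cons, joinNilFlatten (y :: r)]
    simp

-- B's run scan, flattened, is the per-character map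
theorem rot5_go_flatten : ∀ (n : Nat) (l : List Char), l.length ≤ n →
    (rot5_go l).flatten = l.map rot5Char := by
  intro n
  induction n with
  | zero =>
    intro l hl
    have : l = [] := List.eq_nil_of_length_eq_zero (Nat.le_zero.mp hl)
    subst this
    simp [rot5_go]
  | succ n ih =>
    intro l hl
    match l with
    | [] => simp [rot5_go]
    | c :: cs =>
      rw [rot5_go]
      set nd := (c :: cs).takeWhile (fun x => !rot5IsDig x) with hnd
      set r1 := (c :: cs).dropWhile (fun x => !rot5IsDig x) with hr1
      set ds := r1.takeWhile rot5IsDig with hds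
      set r2 := r1.dropWhile rot5IsDig with hr2
      have hdec : r2.length < (c :: cs).length := rot5_go_dec c cs
      have hih : (rot5_go r2).flatten = r2.map rot5Char := by
        apply ih
        simp only [List.length_cons] at hdec hl ⊢
        omega
      simp only [List.flatten_cons, List.flatten_append, hih]
      have hflat : (ds.map (fun d => [rot5Shift d])).flatten = ds.map rot5Shift := by
        induction ds with
        | nil => simp
        | cons d ds' ihd => simp [ihd]
      rw [hflat]
      have hsplit1 : nd ++ r1 = c :: cs := List.takeWhile_append_dropWhile
      have hsplit2 : ds ++ r2 = r1 := List.takeWhile_append_dropWhile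
      have hmapnd : nd.map rot5Char = nd := by
        have hall : ∀ x ∈ nd, rot5Char x = x := by
          intro x hx
          have := List.mem_takeWhile_imp hx
          simp only [Bool.not_eq_true'] at this
          simp [rot5Char, this]
        calc nd.map rot5Char = nd.map id := List.map_congr_left hall
          _ = nd := List.map_id nd
      have hmapds : ds.map rot5Char = ds.map rot5Shift := by
        apply List.map_congr_left
        intro x hx
        have := List.mem_takeWhile_imp hx
        simp [rot5Char, this]
      calc nd ++ (ds.map rot5Shift ++ r2.map rot5Char)
          = nd.map rot5Char ++ (ds.map rot5Char ++ r2.map rot5Char) := by rw [hmapnd, hmapds]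
        _ = ((nd ++ ds) ++ r2).map rot5Char := by simp [List.map_append, List.append_assoc]
        _ = (c :: cs).map rot5Char := by rw [List.append_assoc, hsplit2, hsplit1]

-- ===== VERDICT (by name: the statement is the Claim_ definition above) =====
theorem rot5_spec : Claim_equal_rot5 := by
  intro text _
  unfold Spec_rot5 rot5 rot5_alt
  rw [foldl_singletons]
  have hmap : (text.toList.map (fun c =>
      if PySem.Chars.isdigit c
      then PySem.Int.toChars (PySem.Int.mod ((PySem.Int.ofChars? [c]).getD 0 + 5) 10)
      else [c])) = (text.toList.map rot5Char).map (fun c => [c]) := by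
    rw [List.map_map]
    exact List.map_congr_left (fun c _ => rot5_step c)
  simp only [List.nil_append, hmap]
  rw [PySem.Chars.join_nil_singletons, joinNilFlatten,
    rot5_go_flatten text.toList.length text.toList (le_refl _)]
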